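-- pv_equiv track=rewrite | github.com/hoyonzz/Algorithm_study | Programmers/코딩기초트레이닝/수조작하기1.py | solution
-- ===== SOURCE A (Python) =====
-- def solution(n, control):
--     answer = n
--     for s in control:
--         if s == 'w':
--             answer += 1
--         elif s == 's':
--             answer -= 1
--         elif s == 'd':
--             answer += 10
--         elif s == 'a':
--             answer -= 10
--
--     return answer
-- ===== SOURCE B (Python) =====
-- _DELTA = {'w': 1, 's': -1, 'd': 10, 'a': -10}
--
-- def _delta(s):
--     # total displacement of a control segment, by divide and conquer
--     # (valid because the per-move deltas commute and add)
--     if len(s) <= 1: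
--         return _DELTA.get(s, 0) if s else 0
--     m = len(s) // 2
--     return _delta(s[:m]) + _delta(s[m:])
--
-- def solution(n, control):
--     return n + _delta(control)
-- ===== Notes on version B (the rewrite author's own statement) =====
-- stated objective: alternative
-- what changed: Replaces the left-to-right accumulator loop by a divide-and-conquer recursion: the control string is split in halves, each half's total displacement is computed recursively from a char->delta table, and the two displacements are added to n (correct because the moves commute).
import Mathlib
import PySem

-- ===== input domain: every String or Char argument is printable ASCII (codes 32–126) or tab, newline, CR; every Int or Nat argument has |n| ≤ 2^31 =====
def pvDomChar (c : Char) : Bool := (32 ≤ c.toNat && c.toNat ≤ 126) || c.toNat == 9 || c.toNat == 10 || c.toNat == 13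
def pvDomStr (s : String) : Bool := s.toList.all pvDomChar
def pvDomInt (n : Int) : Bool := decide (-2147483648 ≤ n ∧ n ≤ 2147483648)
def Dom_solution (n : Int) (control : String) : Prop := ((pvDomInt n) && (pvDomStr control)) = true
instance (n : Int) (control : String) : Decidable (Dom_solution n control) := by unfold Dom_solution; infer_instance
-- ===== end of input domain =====

-- B replaces A's sequential accumulator loop by a divide-and-conquer recursion over halves of the
-- control string (an alternative decomposition, same cost; valid because the move deltas commute and add).

-- ===== PORT A =====
-- A: running accumulator, branch on each character of control.
def solution (n : Int) (control : String) : Int :=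
  control.toList.foldl
    (fun answer s =>
      if s = 'w' then answer + 1
      else if s = 's' then answer - 1
      else if s = 'd' then answer + 10
      else if s = 'a' then answer - 10
      else answer) n

-- ===== PORT B =====
-- B: _DELTA table lookup for a single move (dict.get with default 0).
def deltaTable (c : Char) : Int :=
  PySem.Dict.getD (PySem.Dict.ofList [('w', (1 : Int)), ('s', -1), ('d', 10), ('a', -10)]) c 0

-- B: _delta — total displacement of a segment, split in halves recursively.
def deltaDC (s : List Char) : Int :=
  if _h : s.length ≤ 1 then
    match s with
    | [] => 0
    | c :: _ => deltaTable c
  else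
    let m := s.length / 2
    deltaDC (s.take m) + deltaDC (s.drop m)
termination_by s.length
decreasing_by
  · simp only [List.length_take]; omega
  · simp only [List.length_drop]; omega

def solution_alt (n : Int) (control : String) : Int :=
  n + deltaDC control.toList

-- ===== PRECONDITION & SPEC =====
def Spec_solution (n : Int) (control : String) (out : Int) : Prop := out = solution_alt n control
instance (n : Int) (control : String) (out : Int) : Decidable (Spec_solution n control out) := by unfold Spec_solution; infer_instance

-- ===== CLAIM (what is proved, stated in full; the proofs are below) =====
def Claim_equal_solution : Prop := ∀ (n : Int) (control : String), Dom_solution n control → Spec_solution n control (solution n control)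

-- ===== LEMMAS AND PROOFS =====
-- The table lookup as an if-chain.
theorem deltaTable_eq (c : Char) :
    deltaTable c = if c = 'w' then 1 else if c = 's' then -1 else if c = 'd' then 10
      else if c = 'a' then -10 else 0 := by
  split_ifs with hw hs hd ha
  · subst hw; decide
  · subst hs; decide
  · subst hd; decide
  · subst ha; decide
  · have hne : ∀ x : Char, ¬ c = x → (x == c) = false := by
      intro x h
      exact beq_eq_false_iff_ne.mpr fun e => h e.symm
    simp [deltaTable, PySem.Dict.getD, PySem.Dict.ofList, PySem.Dict.get?, PySem.Dict.empty,
      PySem.Dict.update, PySem.Dict.insert, PySem.Dict.contains, List.find?,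
      hne _ hw, hne _ hs, hne _ hd, hne _ ha]

-- The divide-and-conquer displacement is the sum of per-character deltas.
theorem deltaDC_eq_sum (s : List Char) : deltaDC s = (s.map deltaTable).sum := by
  induction s using deltaDC.induct with
  | case1 _ _ => simp [deltaDC]
  | case2 c tail h _ =>
    have ht : tail = [] := by simpa using h
    subst ht; simp [deltaDC]
  | case3 x h m ih1 ih2 =>
    rw [deltaDC, dif_neg h]
    show deltaDC (List.take m x) + deltaDC (List.drop m x) = _
    rw [ih1, ih2, ← List.sum_append, ← List.map_append, List.take_append_drop]

-- A's accumulated answer is n plus the sum of per-character deltas.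
theorem foldl_eq_sum (n : Int) (s : List Char) :
    s.foldl
      (fun answer c =>
        if c = 'w' then answer + 1
        else if c = 's' then answer - 1
        else if c = 'd' then answer + 10
        else if c = 'a' then answer - 10
        else answer) n = n + (s.map deltaTable).sum := by
  induction s generalizing n with
  | nil => simp
  | cons c t ih =>
    simp only [List.foldl_cons, List.map_cons, List.sum_cons, ih, deltaTable_eq]
    split_ifs <;> ring

-- ===== VERDICT (by name: the statement is the Claim_ definition above) =====
theorem solution_spec : Claim_equal_solution := by
  intro n control _
  unfold Spec_solution solution solution_alt
  rw [foldl_eq_sum, deltaDC_eq_sum]
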